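-- pv_equiv track=rewrite | github.com/dmarquette18/Golden-Globe-Scanner | presenter.py | findPresenters
-- ===== SOURCE A (Python) =====
-- def findPresenters(awardNames, awardWeights, scanDict):
--     """
--     awardNames is a list
--     awardWeights is a dict - {word1: num, word2: num}
--     scanDict is a dict - {presenter1: {keyword1: count, keyword2: count}
--                           presenter2: {keyword1: count, keyword2: count}}
--     """
--     # make a result dictionary - {awardName: [presenter1, presenter2]}
--     finalMapping = {}
--     for award in awardNames:
--         finalMapping[award] = []
--     # loop over presenters and find match
--     for presenter in scanDict:
--         matchNum = {}
--         for award in awardNames: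
--             matchNum[award] = 0
--         for award in matchNum:
--             for word in scanDict[presenter]:
--                 if word in award:
--                     score = scanDict[presenter][word]
--                     if word in awardWeights:
--                         score *= awardWeights[word]
--                     matchNum[award] += score
--         matched = max(matchNum, key=matchNum.get)
--         finalMapping[matched].append(presenter)
--     return finalMapping
-- ===== SOURCE B (Python) =====
-- def findPresenters(awardNames, awardWeights, scanDict):
--     # distinct awards in first-occurrence order
--     awards = list(dict.fromkeys(awardNames))
--     n = len(awards)
--     # precompute once, for every distinct keyword, the award indices containing it
--     allWords = dict.fromkeys(w for ws in scanDict.values() for w in ws)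
--     index = {w: [i for i in range(n) if w in awards[i]] for w in allWords}
--     result = {a: [] for a in awardNames}
--     for presenter, words in scanDict.items():
--         scores = [0] * n
--         for word, count in words.items():
--             s = count * awardWeights.get(word, 1)
--             for i in index[word]:
--                 scores[i] += s
--         best = awards[max(range(n), key=scores.__getitem__)]
--         result[best].append(presenter)
--     return result
-- ===== Notes on version B (the rewrite author's own statement) =====
-- stated objective: faster
-- what changed: Instead of re-testing every (award, word) substring pair for every presenter, B deduplicates the awards once, precomputes a keyword->containing-award-indices table over all distinct keywords, and per presenter accumulates an integer score array via table lookups, picking the argmax index.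
import Mathlib
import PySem

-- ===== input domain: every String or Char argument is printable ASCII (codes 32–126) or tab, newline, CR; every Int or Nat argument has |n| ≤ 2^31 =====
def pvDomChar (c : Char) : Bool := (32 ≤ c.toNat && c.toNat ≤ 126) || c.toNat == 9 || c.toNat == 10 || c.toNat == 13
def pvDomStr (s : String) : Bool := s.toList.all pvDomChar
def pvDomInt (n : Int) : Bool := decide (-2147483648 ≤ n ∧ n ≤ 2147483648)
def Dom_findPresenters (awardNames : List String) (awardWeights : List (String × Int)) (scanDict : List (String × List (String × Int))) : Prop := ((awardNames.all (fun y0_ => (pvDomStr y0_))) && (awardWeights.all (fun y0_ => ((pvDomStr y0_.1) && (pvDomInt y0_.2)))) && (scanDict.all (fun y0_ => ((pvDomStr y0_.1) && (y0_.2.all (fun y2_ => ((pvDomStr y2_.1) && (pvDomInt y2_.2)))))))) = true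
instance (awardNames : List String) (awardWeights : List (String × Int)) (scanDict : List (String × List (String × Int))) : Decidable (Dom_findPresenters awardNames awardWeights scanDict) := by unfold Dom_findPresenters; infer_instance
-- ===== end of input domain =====

-- B re-implements the presenter→award matching with a single precomputed keyword→award-indices table
-- and a per-presenter score array instead of re-testing every (award, word) substring pair per presenter.

-- ===== PORT A =====
-- loop body of A's 'for presenter in scanDict' loop, as a named helper
def findPresentersStep (awardNames : List String) (weights : PySem.Dict String Int)
    (fm : PySem.Dict String (List String)) (pr : String × List (String × Int)) :
    PySem.Dict String (List String) :=
  let words := PySem.Dict.ofList pr.2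
  let mn0 : PySem.Dict String Int := awardNames.foldl (fun d a => d.insert a 0) PySem.Dict.empty
  let mn := mn0.keys.foldl (fun mn award =>
      words.keys.foldl (fun mn word =>
        if PySem.Str.isIn word award then
          mn.modify award 0 (· + (if weights.contains word then words.getD word 0 * weights.getD word 0 else words.getD word 0))
        else mn) mn) mn0
  -- max(matchNum, key=matchNum.get): first key with maximal value; none = ValueError (excluded by Pre_)
  match PySem.List.max? mn.keys (fun k => mn.getD k 0) with
  | some matched => fm.modify matched [] (· ++ [pr.1])
  | none => fm

def findPresenters (awardNames : List String) (awardWeights : List (String × Int)) (scanDict : List (String × List (String × Int))) : List (String × List String) :=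
  let weights := PySem.Dict.ofList awardWeights
  let scan := PySem.Dict.ofList scanDict
  let fm0 : PySem.Dict String (List String) := awardNames.foldl (fun d a => d.insert a []) PySem.Dict.empty
  (scan.items.foldl (findPresentersStep awardNames weights) fm0).items

-- ===== PORT B =====
-- indices of the awards containing keyword w ([i for i in range(n) if w in awards[i]])
def bHits (awards : List String) (w : String) : List Nat :=
  (List.range awards.length).filter (fun i => PySem.Str.isIn w (awards.getD i ""))

-- loop body of B's 'for presenter, words in scanDict.items()' loop
def findPresentersAltStep (awards : List String) (weights : PySem.Dict String Int)
    (index : PySem.Dict String (List Nat))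
    (res : PySem.Dict String (List String)) (pr : String × List (String × Int)) :
    PySem.Dict String (List String) :=
  let words := PySem.Dict.ofList pr.2
  let scores := words.items.foldl (fun sc wc =>
      (index.getD wc.1 []).foldl (fun sc i => sc.set i (sc.getD i 0 + wc.2 * weights.getD wc.1 1)) sc)
    (List.replicate awards.length 0)
  match PySem.List.max? (List.range awards.length) (fun i => scores.getD i 0) with
  | some bi => res.modify (awards.getD bi "") [] (· ++ [pr.1])
  | none => res

def findPresenters_alt (awardNames : List String) (awardWeights : List (String × Int)) (scanDict : List (String × List (String × Int))) : List (String × List String) :=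
  let weights := PySem.Dict.ofList awardWeights
  let scan := PySem.Dict.ofList scanDict
  let awards := PySem.List.dedup awardNames
  let allWords := PySem.List.dedup (scan.values.flatMap (fun ws => (PySem.Dict.ofList ws).keys))
  let index : PySem.Dict String (List Nat) := PySem.Dict.ofList (allWords.map (fun w => (w, bHits awards w)))
  let result0 : PySem.Dict String (List String) := awardNames.foldl (fun d a => d.insert a []) PySem.Dict.empty
  (scan.items.foldl (findPresentersAltStep awards weights index) result0).items

-- ===== PRECONDITION & SPEC =====
-- Pre_ excludes only the inputs where Python A raises: empty awardNames with a nonempty scanDict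
-- makes max() raise ValueError on the empty matchNum dict.
def Pre_findPresenters (awardNames : List String) (awardWeights : List (String × Int)) (scanDict : List (String × List (String × Int))) : Prop :=
  awardNames ≠ [] ∨ scanDict = []
instance (awardNames : List String) (awardWeights : List (String × Int)) (scanDict : List (String × List (String × Int))) : Decidable (Pre_findPresenters awardNames awardWeights scanDict) := by unfold Pre_findPresenters; infer_instance

def pvWitness_findPresenters : List String × (List (String × Int)) × (List (String × List (String × Int))) :=
  (["best actor", "best song"], [("actor", 2)], [("amy", [("actor", 1), ("song", 1)])])

def Spec_findPresenters (awardNames : List String) (awardWeights : List (String × Int)) (scanDict : List (String × List (String × Int))) (out : List (String × List String)) : Prop := out = findPresenters_alt awardNames awardWeights scanDict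
instance (awardNames : List String) (awardWeights : List (String × Int)) (scanDict : List (String × List (String × Int))) (out : List (String × List String)) : Decidable (Spec_findPresenters awardNames awardWeights scanDict out) := by unfold Spec_findPresenters; infer_instance

-- ===== CLAIM (what is proved, stated in full; the proofs are below) =====
def Claim_equal_findPresenters : Prop := ∀ (awardNames : List String) (awardWeights : List (String × Int)) (scanDict : List (String × List (String × Int))), Dom_findPresenters awardNames awardWeights scanDict → Pre_findPresenters awardNames awardWeights scanDict → Spec_findPresenters awardNames awardWeights scanDict (findPresenters awardNames awardWeights scanDict)

-- ===== LEMMAS AND PROOFS =====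

-- A's matchNum init: every entry (and the default) is 0
lemma getD_foldl_insert_zero (l : List String) (d : PySem.Dict String Int) (x : String)
    (h : d.getD x 0 = 0) : (l.foldl (fun d a => d.insert a (0:Int)) d).getD x 0 = 0 := by
  induction l generalizing d with
  | nil => exact h
  | cons a t ih => exact ih _ (by rw [PySem.Dict.getD_insert]; split_ifs <;> simp [h])

-- A's inner word loop only touches key a; keys are preserved when a is present
lemma keys_inner (ws : List String) (score : String → Int) (a : String)
    (mn : PySem.Dict String Int) (ha : a ∈ mn.keys) :
    (ws.foldl (fun mn w => if PySem.Str.isIn w a then mn.modify a 0 (· + score w) else mn) mn).keys = mn.keys := by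
  induction ws generalizing mn with
  | nil => rfl
  | cons w t ih =>
    simp only [List.foldl_cons]
    split_ifs with hc
    · rw [ih _ (by rw [PySem.Dict.keys_modify, PySem.Dict.keys_insert_of_contains _ _ ((PySem.Dict.contains_iff_mem_keys _ _).mpr ha)]; exact ha)]
      rw [PySem.Dict.keys_modify, PySem.Dict.keys_insert_of_contains _ _ ((PySem.Dict.contains_iff_mem_keys _ _).mpr ha)]
    · exact ih _ ha

-- value of A's inner word loop
lemma getD_inner (ws : List String) (score : String → Int) (a x : String)
    (mn : PySem.Dict String Int) :
    (ws.foldl (fun mn w => if PySem.Str.isIn w a then mn.modify a 0 (· + score w) else mn) mn).getD x 0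
      = mn.getD x 0 + (if x = a then ((ws.map (fun w => if PySem.Str.isIn w a then score w else 0)).sum) else 0) := by
  induction ws generalizing mn with
  | nil => simp
  | cons w t ih =>
    simp only [List.foldl_cons, List.map_cons, List.sum_cons]
    by_cases hc : PySem.Str.isIn w a = true
    · rw [if_pos hc, ih, PySem.Dict.getD_modify]
      simp only [PySem.Str.isIn_eq] at hc
      by_cases hx : x = a <;> simp [hx, hc] <;> omega
    · rw [if_neg hc, ih]
      simp only [PySem.Str.isIn_eq] at hc
      by_cases hx : x = a <;> simp [hx, hc]

-- A's outer award loop preserves keys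
lemma keys_outer (l : List String) (ws : List String) (score : String → Int)
    (mn : PySem.Dict String Int) (hk : ∀ a ∈ l, a ∈ mn.keys) :
    (l.foldl (fun mn a => ws.foldl (fun mn w => if PySem.Str.isIn w a then mn.modify a 0 (· + score w) else mn) mn) mn).keys = mn.keys := by
  induction l generalizing mn with
  | nil => rfl
  | cons a t ih =>
    simp only [List.foldl_cons]
    have hka := keys_inner ws score a mn (hk a (by simp))
    rw [ih _ (by rw [hka]; exact fun b hb => hk b (by simp [hb])), hka]

-- value of A's outer award loop
lemma getD_outer (l : List String) (ws : List String) (score : String → Int) (x : String)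
    (mn : PySem.Dict String Int) (hnd : l.Nodup) (hk : ∀ a ∈ l, a ∈ mn.keys) :
    (l.foldl (fun mn a => ws.foldl (fun mn w => if PySem.Str.isIn w a then mn.modify a 0 (· + score w) else mn) mn) mn).getD x 0
      = mn.getD x 0 + (if x ∈ l then ((ws.map (fun w => if PySem.Str.isIn w x then score w else 0)).sum) else 0) := by
  induction l generalizing mn with
  | nil => simp
  | cons a t ih =>
    simp only [List.foldl_cons]
    have hka := keys_inner ws score a mn (hk a (by simp))
    rw [ih _ (List.Nodup.of_cons hnd) (by rw [hka]; exact fun b hb => hk b (by simp [hb])), getD_inner]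
    by_cases hx : x = a
    · subst hx
      have hxt : x ∉ t := (List.nodup_cons.mp hnd).1
      simp [hxt]
    · simp only [hx, if_false, add_zero, List.mem_cons]
      by_cases hxt : x ∈ t <;> simp [hx, hxt]

-- B's index-update loop keeps the score array's length
lemma length_foldl_set (hits : List Nat) (g : List Int → Nat → Int) (sc : List Int) :
    (hits.foldl (fun sc j => sc.set j (g sc j)) sc).length = sc.length := by
  induction hits generalizing sc with
  | nil => rfl
  | cons j t ih => simp [ih]

-- value of B's index-update loop
lemma getD_foldl_set (hits : List Nat) (s : Int) (sc : List Int) (i : Nat)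
    (hnd : hits.Nodup) (hb : ∀ j ∈ hits, j < sc.length) :
    (hits.foldl (fun sc j => sc.set j (sc.getD j 0 + s)) sc).getD i 0
      = sc.getD i 0 + (if i ∈ hits then s else 0) := by
  induction hits generalizing sc with
  | nil => simp
  | cons j t ih =>
    simp only [List.foldl_cons]
    have hj : j < sc.length := hb j (by simp)
    have hlen : (sc.set j (sc.getD j 0 + s)).length = sc.length := by simp
    rw [ih _ (List.Nodup.of_cons hnd) (by rw [hlen]; exact fun k hk => hb k (by simp [hk]))]
    by_cases hx : i = j
    · subst hx
      have hit : i ∉ t := (List.nodup_cons.mp hnd).1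
      simp [hit, List.getD_eq_getElem?_getD, List.getElem?_set, hj]
    · simp only [List.mem_cons, hx, false_or]
      have : (sc.set j (sc.getD j 0 + s)).getD i 0 = sc.getD i 0 := by
        simp [List.getD_eq_getElem?_getD, List.getElem?_set, (Ne.symm hx : j ≠ i)]
      rw [this]

-- value of B's per-presenter word loop
lemma getD_scores (items : List (String × Int)) (idx : String → List Nat) (f : String → Int)
    (sc : List Int) (i : Nat)
    (h : ∀ wc ∈ items, (idx wc.1).Nodup ∧ ∀ j ∈ idx wc.1, j < sc.length) :
    (items.foldl (fun sc wc => (idx wc.1).foldl (fun sc j => sc.set j (sc.getD j 0 + wc.2 * f wc.1)) sc) sc).getD i 0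
      = sc.getD i 0 + (items.map (fun wc => if i ∈ idx wc.1 then wc.2 * f wc.1 else 0)).sum := by
  induction items generalizing sc with
  | nil => simp
  | cons wc t ih =>
    simp only [List.foldl_cons, List.map_cons, List.sum_cons]
    have hlen : ((idx wc.1).foldl (fun sc j => sc.set j (sc.getD j 0 + wc.2 * f wc.1)) sc).length = sc.length :=
      length_foldl_set _ _ _
    rw [ih _ (fun w hw => ⟨(h w (by simp [hw])).1, by rw [hlen]; exact (h w (by simp [hw])).2⟩)]
    rw [getD_foldl_set _ _ _ _ (h wc (by simp)).1 (h wc (by simp)).2]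
    ring

-- B's precomputed table returns exactly its generating function on every indexed word
lemma getD_bIndex (allWords : List String) (hnd : allWords.Nodup)
    (hits : String → List Nat) (w : String) (hw : w ∈ allWords) :
    (PySem.Dict.ofList (allWords.map (fun w => (w, hits w)))).getD w [] = hits w := by
  have hitems : (PySem.Dict.ofList (allWords.map (fun w => (w, hits w)))).items
      = allWords.map (fun w => (w, hits w)) := by
    show (List.foldl (fun acc p => acc.insert p.1 p.2) PySem.Dict.empty (allWords.map (fun w => (w, hits w)))).items = _
    rw [List.foldl_map]
    rw [PySem.Dict.items_foldl_insert_fresh allWords (fun w => w) (fun w => hits w) PySem.Dict.empty (by simp) (by simpa using hnd)]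
    simp [PySem.Dict.items, PySem.Dict.empty]
  exact PySem.Dict.getD_of_mem_items _ (by rw [hitems]; exact List.mem_map.mpr ⟨w, hw, rfl⟩) (PySem.Dict.nodup_keys_ofList _) _

lemma mem_bHits (awards : List String) (w : String) (i : Nat) :
    i ∈ bHits awards w ↔ i < awards.length ∧ PySem.Str.isIn w (awards.getD i "") = true := by
  simp [bHits, List.mem_filter, List.mem_range]

-- A's conditional weighting equals B's multiplication by weights.get(w, 1)
lemma score_eq (weights words : PySem.Dict String Int) (w : String) :
    (if weights.contains w then words.getD w 0 * weights.getD w 0 else words.getD w 0)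
      = words.getD w 0 * weights.getD w 1 := by
  by_cases h : weights.contains w = true
  · cases hg : weights.get? w with
    | none => rw [PySem.Dict.contains_eq_isSome_get?, hg] at h; simp at h
    | some v => simp [h, PySem.Dict.getD_of_get?_eq_some _ _ hg]
  · simp at h
    simp [h, PySem.Dict.getD_of_not_contains _ _ h]

lemma self_eq_map_range (l : List String) :
    l = (List.range l.length).map (fun i => l.getD i "") := by
  apply List.ext_getElem
  · simp
  · intro i p q
    simp only [List.getElem_map, List.getElem_range, List.getD_eq_getElem?_getD]
    rw [List.getElem?_eq_getElem p]; rfl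

-- max over a mapped list with agreeing keys
lemma max?_map_congr_aux {α β : Type} (t : List α) (f : α → β) (k1 : β → Int) (k2 : α → Int)
    (acc : Option α)
    (hacc : ∀ m, acc = some m → k1 (f m) = k2 m)
    (h : ∀ x ∈ t, k1 (f x) = k2 x) :
    List.foldl (fun acc x => match acc with
      | none => some (f x)
      | some m => if k1 m < k1 (f x) then some (f x) else some m) (acc.map f) t
    = (List.foldl (fun acc x => match acc with
      | none => some x
      | some m => if k2 m < k2 x then some x else some m) acc t).map f := by
  induction t generalizing acc with
  | nil => rfl
  | cons x t ih =>
    cases acc with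
    | none =>
      simp only [List.foldl_cons, Option.map_none]
      exact ih (some x) (by rintro m hm; cases hm; exact h x (by simp)) (fun y hy => h y (by simp [hy]))
    | some m =>
      simp only [List.foldl_cons, Option.map_some]
      rw [hacc m rfl, h x (by simp)]
      split_ifs with hc
      · exact ih (some x) (by rintro m' hm'; cases hm'; exact h x (by simp)) (fun y hy => h y (by simp [hy]))
      · exact ih (some m) (by rintro m' hm'; cases hm'; exact hacc _ rfl) (fun y hy => h y (by simp [hy]))

lemma max?_map_congr {α β : Type} (l : List α) (f : α → β) (k1 : β → Int) (k2 : α → Int)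
    (h : ∀ x ∈ l, k1 (f x) = k2 x) :
    PySem.List.max? (l.map f) k1 = (PySem.List.max? l k2).map f := by
  unfold PySem.List.max?
  rw [List.foldl_map]
  exact max?_map_congr_aux l f k1 k2 none (by simp) h

-- the two per-presenter loop bodies agree
lemma step_eq (awardNames : List String) (weights : PySem.Dict String Int)
    (allWords : List String) (hnd : allWords.Nodup)
    (pr : String × List (String × Int))
    (hw : ∀ w ∈ (PySem.Dict.ofList pr.2).keys, w ∈ allWords)
    (fm : PySem.Dict String (List String)) :
    findPresentersStep awardNames weights fm pr
      = findPresentersAltStep (PySem.List.dedup awardNames) weights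
          (PySem.Dict.ofList (allWords.map (fun w => (w, bHits (PySem.List.dedup awardNames) w)))) fm pr := by
  unfold findPresentersStep findPresentersAltStep
  dsimp only
  set words : PySem.Dict String Int := PySem.Dict.ofList pr.2 with hwordsdef
  set awards : List String := PySem.List.dedup awardNames with hawardsdef
  set mn0 : PySem.Dict String Int := awardNames.foldl (fun d a => d.insert a 0) PySem.Dict.empty with hmn0def
  have hkeys0 : mn0.keys = awards := by
    rw [hmn0def, PySem.Dict.keys_foldl_insert (f := fun _ _ => (0:Int))]
    rw [PySem.Dict.keys_empty, PySem.Set.update_nil_left, hawardsdef]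
    rfl
  rw [hkeys0]
  have hnda : awards.Nodup := PySem.List.nodup_dedup _
  have hk : ∀ a ∈ awards, a ∈ mn0.keys := fun a ha => hkeys0 ▸ ha
  have hmkeys : (awards.foldl (fun mn award =>
      words.keys.foldl (fun mn word =>
        if PySem.Str.isIn word award then
          mn.modify award 0 (· + (if weights.contains word then words.getD word 0 * weights.getD word 0 else words.getD word 0))
        else mn) mn) mn0).keys = awards := by
    rw [keys_outer _ _ _ _ hk, hkeys0]
  set mnf : PySem.Dict String Int := awards.foldl (fun mn award =>
      words.keys.foldl (fun mn word =>
        if PySem.Str.isIn word award then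
          mn.modify award 0 (· + (if weights.contains word then words.getD word 0 * weights.getD word 0 else words.getD word 0))
        else mn) mn) mn0 with hmnfdef
  set idx : PySem.Dict String (List Nat) := PySem.Dict.ofList (allWords.map (fun w => (w, bHits awards w))) with hidxdef
  set scores : List Int := words.items.foldl (fun sc wc =>
      (idx.getD wc.1 []).foldl (fun sc i => sc.set i (sc.getD i 0 + wc.2 * weights.getD wc.1 1)) sc)
    (List.replicate awards.length 0) with hscoresdef
  have hidx : ∀ wc ∈ words.items, idx.getD wc.1 [] = bHits awards wc.1 := by
    intro wc hwc
    rw [hidxdef]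
    exact getD_bIndex allWords hnd _ _ (hw wc.1 (List.mem_map.mpr ⟨wc, hwc, rfl⟩))
  have hval : ∀ i ∈ List.range awards.length, mnf.getD (awards.getD i "") 0 = scores.getD i 0 := by
    intro i hi
    rw [List.mem_range] at hi
    have hmem : awards.getD i "" ∈ awards := by
      rw [List.getD_eq_getElem?_getD, List.getElem?_eq_getElem hi]
      exact List.getElem_mem hi
    have hA : mnf.getD (awards.getD i "") 0
        = (words.keys.map (fun w => if PySem.Str.isIn w (awards.getD i "") then (if weights.contains w then words.getD w 0 * weights.getD w 0 else words.getD w 0) else 0)).sum := by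
      rw [hmnfdef, getD_outer _ _ _ _ _ hnda hk,
        getD_foldl_insert_zero _ _ _ (by simp [PySem.Dict.getD_empty]), if_pos hmem, zero_add]
    have hrep : (List.replicate awards.length (0:Int)).getD i 0 = 0 := by
      simp [List.getD_eq_getElem?_getD, List.getElem?_replicate, hi]
    have hB : scores.getD i 0
        = (words.items.map (fun wc => if i ∈ idx.getD wc.1 [] then wc.2 * weights.getD wc.1 1 else 0)).sum := by
      rw [hscoresdef, getD_scores _ (fun w => idx.getD w []) (fun w => weights.getD w 1) _ _
        (by
          intro wc hwc
          constructor
          · show (idx.getD wc.1 []).Nodup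
            rw [hidx wc hwc]
            exact List.Nodup.filter _ List.nodup_range
          · show ∀ j ∈ idx.getD wc.1 [], j < (List.replicate awards.length (0:Int)).length
            intro j hj
            rw [hidx wc hwc] at hj
            rw [List.length_replicate]
            exact ((mem_bHits _ _ _).mp hj).1), hrep, zero_add]
    rw [hA, hB]
    rw [PySem.Dict.items_eq_map_keys words (PySem.Dict.nodup_keys_ofList _) 0, List.map_map]
    apply congrArg List.sum
    apply List.map_congr_left
    intro w hwk
    have hidxw : idx.getD w [] = bHits awards w := by
      rw [hidxdef]
      exact getD_bIndex allWords hnd _ _ (hw w hwk)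
    show (if PySem.Str.isIn w (awards.getD i "") then (if weights.contains w then words.getD w 0 * weights.getD w 0 else words.getD w 0) else 0)
      = (if i ∈ idx.getD w [] then words.getD w 0 * weights.getD w 1 else 0)
    rw [hidxw]
    by_cases hin : PySem.Str.isIn w (awards.getD i "") = true
    · rw [if_pos hin, if_pos ((mem_bHits _ _ _).mpr ⟨hi, hin⟩), score_eq]
    · rw [if_neg hin, if_neg (fun hm2 => hin ((mem_bHits _ _ _).mp hm2).2)]
  have hmax : PySem.List.max? mnf.keys (fun k => mnf.getD k 0)
      = (PySem.List.max? (List.range awards.length) (fun i => scores.getD i 0)).map (fun i => awards.getD i "") := by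
    rw [hmkeys]
    conv_lhs => rw [self_eq_map_range awards]
    exact max?_map_congr _ _ _ _ hval
  rw [hmax]
  cases PySem.List.max? (List.range awards.length) (fun i => scores.getD i 0) with
  | none => rfl
  | some bi => rfl

-- ===== VERDICT (by name: the statement is the Claim_ definition above) =====
theorem findPresenters_spec : Claim_equal_findPresenters := by
  intro awardNames awardWeights scanDict _ _
  unfold Spec_findPresenters findPresenters findPresenters_alt
  dsimp only
  congr 1
  apply PySem.List.foldl_congr_mem
  intro fm pr hpr
  apply step_eq
  · exact PySem.List.nodup_dedup _
  · intro w hwk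
    rw [PySem.List.mem_dedup]
    exact List.mem_flatMap.mpr ⟨pr.2, List.mem_map.mpr ⟨pr, hpr, rfl⟩, hwk⟩
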